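-- pv_equiv track=rewrite | github.com/sandy0637R/Python_DSA | tokenization.py | custom_tokenization
-- ===== SOURCE A (Python) =====
-- def custom_tokenization(input_text):
--     tokens = []
--     current_token = ""
--
--     for char in input_text:
--         if char.isalnum() or char == " ":
--             current_token += char
--         elif current_token:
--             tokens.append(current_token)
--             current_token = ""
--
--     if current_token:
--         tokens.append(current_token)
--
--     return tokens
-- ===== SOURCE B (Python) =====
-- def custom_tokenization(input_text):
--     # span/two-pointer scan: find each maximal run of token chars and slice it out
--     def keep(c):
--         return c.isalnum() or c == " "
--     tokens = []
--     i, n = 0, len(input_text)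
--     while i < n:
--         if keep(input_text[i]):
--             j = i
--             while j < n and keep(input_text[j]):
--                 j += 1
--             tokens.append(input_text[i:j])
--             i = j
--         else:
--             i += 1
--     return tokens
-- ===== Notes on version B (the rewrite author's own statement) =====
-- stated objective: alternative
-- what changed: Replaced the char-by-char accumulator-with-flush loop by a two-pointer span scan that locates each maximal run of token characters and slices it out in one step.
import Mathlib
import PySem

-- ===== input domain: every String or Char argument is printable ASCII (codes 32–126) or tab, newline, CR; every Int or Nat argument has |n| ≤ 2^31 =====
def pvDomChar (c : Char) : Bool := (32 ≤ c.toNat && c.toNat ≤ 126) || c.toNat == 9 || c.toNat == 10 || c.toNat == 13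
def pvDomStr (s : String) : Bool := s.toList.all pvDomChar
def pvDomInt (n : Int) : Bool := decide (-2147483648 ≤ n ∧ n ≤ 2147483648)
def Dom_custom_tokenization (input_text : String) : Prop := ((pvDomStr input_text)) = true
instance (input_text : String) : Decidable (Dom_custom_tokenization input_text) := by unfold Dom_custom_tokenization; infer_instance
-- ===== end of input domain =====

-- B replaces A's accumulator-with-flush loop by a two-pointer span scan over maximal runs (alternative decomposition, same cost).

-- the character predicate both programs use: c.isalnum() or c == " "
def pvKeep (c : Char) : Bool := PySem.Chars.isalnum c || c == ' '

-- ===== PORT A =====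
-- A's loop: state (tokens, current_token); final flush after the loop.
def custom_tokenization_go (cs : List Char) (tokens : List String) (cur : List Char) : List String :=
  match cs with
  | [] => if cur ≠ [] then tokens ++ [String.ofList cur] else tokens
  | c :: rest =>
    if pvKeep c then custom_tokenization_go rest tokens (cur ++ [c])
    else if cur ≠ [] then custom_tokenization_go rest (tokens ++ [String.ofList cur]) []
    else custom_tokenization_go rest tokens cur

def custom_tokenization (input_text : String) : List String :=
  custom_tokenization_go input_text.toList [] []

-- ===== PORT B =====
-- B's scan: at a token char take the whole maximal run (inner while = takeWhile, slice = the run), else skip one char.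
def custom_tokenization_alt_go (cs : List Char) : List String :=
  match cs with
  | [] => []
  | c :: rest =>
    if hk : pvKeep c then
      String.ofList ((c :: rest).takeWhile pvKeep) :: custom_tokenization_alt_go ((c :: rest).dropWhile pvKeep)
    else custom_tokenization_alt_go rest
termination_by cs.length
decreasing_by
  · simp [hk]
    have := List.length_dropWhile_le pvKeep rest
    omega
  · simp

def custom_tokenization_alt (input_text : String) : List String :=
  custom_tokenization_alt_go input_text.toList

-- ===== PRECONDITION & SPEC =====
def Spec_custom_tokenization (input_text : String) (out : List String) : Prop := out = custom_tokenization_alt input_text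
instance (input_text : String) (out : List String) : Decidable (Spec_custom_tokenization input_text out) := by unfold Spec_custom_tokenization; infer_instance

-- ===== CLAIM (what is proved, stated in full; the proofs are below) =====
def Claim_equal_custom_tokenization : Prop := ∀ (input_text : String), Dom_custom_tokenization input_text → Spec_custom_tokenization input_text (custom_tokenization input_text)

-- ===== LEMMAS AND PROOFS =====

-- B's scanner on an all-keep prefix followed by the rest
lemma alt_go_keep_prefix (cur : List Char) (hcur : ∀ c ∈ cur, pvKeep c = true) (hne : cur ≠ [])
    (ys : List Char) (hys : ys.takeWhile pvKeep = []) :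
    custom_tokenization_alt_go (cur ++ ys) = String.ofList cur :: custom_tokenization_alt_go ys := by
  obtain ⟨c, cur', rfl⟩ := List.exists_cons_of_ne_nil hne
  have hc : pvKeep c = true := hcur c (List.mem_cons_self ..)
  have htk : ((c :: cur') ++ ys).takeWhile pvKeep = c :: cur' := by
    rw [List.takeWhile_append]
    simp only [List.takeWhile_eq_self_iff.mpr (fun x hx => hcur x (List.mem_cons_of_mem _ hx)),
      List.takeWhile_cons, hc]
    simp [hys]
  have hys' : ys.dropWhile pvKeep = ys := by
    cases ys with
    | nil => simp
    | cons y ys' =>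
      simp only [List.takeWhile_cons] at hys
      by_cases hy : pvKeep y = true
      · simp [hy] at hys
      · simp at hy; simp [hy]
  have hdw : ((c :: cur') ++ ys).dropWhile pvKeep = ys := by
    rw [List.dropWhile_append]
    simp only [List.dropWhile_eq_nil_iff.mpr (fun x hx => hcur x hx)]
    simp [hys']
  have htk' : (cur' ++ ys).takeWhile pvKeep = cur' := by
    simpa [List.takeWhile_cons, hc] using htk
  have hdw' : (cur' ++ ys).dropWhile pvKeep = ys := by
    simpa [List.dropWhile_cons, hc] using hdw
  rw [List.cons_append, custom_tokenization_alt_go]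
  simp [hc, htk', hdw']

lemma go_eq_alt (cs : List Char) : ∀ (tokens : List String) (cur : List Char),
    (∀ c ∈ cur, pvKeep c = true) →
    custom_tokenization_go cs tokens cur = tokens ++ custom_tokenization_alt_go (cur ++ cs) := by
  induction cs with
  | nil =>
    intro tokens cur hcur
    rw [custom_tokenization_go]
    by_cases hne : cur = []
    · subst hne; simp [custom_tokenization_alt_go]
    · rw [if_pos hne, alt_go_keep_prefix cur hcur hne [] (by simp)]
      simp [custom_tokenization_alt_go]
  | cons c rest ih =>
    intro tokens cur hcur
    rw [custom_tokenization_go]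
    by_cases hk : pvKeep c = true
    · have hcur' : ∀ x ∈ cur ++ [c], pvKeep x = true := by
        intro x hx
        rcases List.mem_append.1 hx with h | h
        · exact hcur x h
        · simp at h; subst h; exact hk
      rw [if_pos hk, ih tokens (cur ++ [c]) hcur']
      simp
    · have halt : custom_tokenization_alt_go (c :: rest) = custom_tokenization_alt_go rest := by
        rw [custom_tokenization_alt_go]; simp [hk]
      rw [if_neg hk]
      by_cases hne : cur = []
      · subst hne
        rw [if_neg (by simp), ih tokens [] (by simp)]
        simp [halt]
      · rw [if_pos hne, ih (tokens ++ [String.ofList cur]) [] (by simp)]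
        rw [alt_go_keep_prefix cur hcur hne (c :: rest) (by simp [hk])]
        simp [halt]

-- ===== VERDICT (by name: the statement is the Claim_ definition above) =====
theorem custom_tokenization_spec : Claim_equal_custom_tokenization := by
  intro s _
  unfold Spec_custom_tokenization custom_tokenization custom_tokenization_alt
  rw [go_eq_alt s.toList [] [] (by simp)]
  simp
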